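-- pv_equiv track=rewrite | github.com/aiandit/pyadi | tests/examples/fxyz.py | f16
-- ===== SOURCE A (Python) =====
-- def f1(x,y,z):
--     r = x*2*x*y*z
--     return r
--
-- def f2(x,y,z):
--     r = x*y*z*17
--     return r
--
-- def f3(x,y,z):
--     r = x*f1(y*z*17,y*z,z)
--     return r
--
-- def f16(x,y,z):
--     a = 17
--     b = 2.3 * a
--     l = {"t": x, "k": y*2, "m": z*y}
--     s = l["t"] * x
--     i = 0
--     for k in range(4):
--         while i < 3:
--             if x < y:
--                 s += 2*y
--                 r = f1(l["m"], x*y, s)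
--             elif x > z:
--                 r = f2(l["m"], x*y, s)
--             else:
--                 r = f3(l["m"], x*y, s)
--             i += 1
--         s = 0
--     return r
-- ===== SOURCE B (Python) =====
-- def f1(x,y,z):
--     r = x*2*x*y*z
--     return r
--
-- def f2(x,y,z):
--     r = x*y*z*17
--     return r
--
-- def f3(x,y,z):
--     r = x*f1(y*z*17,y*z,z)
--     return r
--
-- def f16(x,y,z):
--     # The loops are dead weight: only the first for-iteration runs the while
--     # (3 passes, one fixed branch); the final r is computed directly.
--     m = z * y
--     p = x * y
--     if x < y:
--         return f1(m, p, x*x + 6*y)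
--     if x > z:
--         return f2(m, p, x*x)
--     return f3(m, p, x*x)
-- ===== Notes on version B (the rewrite author's own statement) =====
-- stated objective: simpler
-- what changed: B eliminates both loops and the dict: the while runs only in the first for-iteration with one fixed branch, so B computes the single final r in closed form (s = x*x + 6*y in the x<y case) calling the same f1/f2/f3.
import Mathlib
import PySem

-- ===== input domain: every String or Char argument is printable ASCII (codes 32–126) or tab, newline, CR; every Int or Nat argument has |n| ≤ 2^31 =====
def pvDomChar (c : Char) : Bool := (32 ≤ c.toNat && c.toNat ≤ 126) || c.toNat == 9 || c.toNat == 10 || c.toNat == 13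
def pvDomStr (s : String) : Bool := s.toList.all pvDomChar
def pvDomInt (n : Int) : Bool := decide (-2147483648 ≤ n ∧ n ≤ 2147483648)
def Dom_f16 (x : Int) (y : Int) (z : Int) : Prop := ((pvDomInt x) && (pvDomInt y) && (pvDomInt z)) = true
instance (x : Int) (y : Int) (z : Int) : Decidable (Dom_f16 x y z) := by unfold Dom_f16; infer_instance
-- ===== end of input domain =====

-- B removes A's dead loops/dict and computes the single final r in closed form (same f1/f2/f3 helpers); objective: simpler.

-- ===== PORT A =====
def f1A (x : Int) (y : Int) (z : Int) : Int := x*2*x*y*z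

def f2A (x : Int) (y : Int) (z : Int) : Int := x*y*z*17

def f3A (x : Int) (y : Int) (z : Int) : Int := x * f1A (y*z*17) (y*z) z

-- the inner 'while i < 3' loop; fuel 3 bounds it exactly (i increases each pass).
-- state: (i, s, r); r : Option Int models Python's possibly-unbound r (always bound in practice).
def f16_while (x : Int) (y : Int) (z : Int) (m : Int) :
    Nat → Int × Int × Option Int → Int × Int × Option Int
  | 0, st => st
  | fuel+1, (i, s, r) =>
    if i < 3 then
      if x < y then
        let s' := s + 2*y
        f16_while x y z m fuel (i+1, s', some (f1A m (x*y) s'))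
      else if x > z then
        f16_while x y z m fuel (i+1, s, some (f2A m (x*y) s))
      else
        f16_while x y z m fuel (i+1, s, some (f3A m (x*y) s))
    else (i, s, r)

def f16 (x : Int) (y : Int) (z : Int) : Int :=
  -- a = 17; b = 2.3 * a  -- unused float, dropped
  let l : PySem.Dict String Int :=
    PySem.Dict.ofList [("t", x), ("k", y*2), ("m", z*y)]
  let s0 := (l.getD "t" 0) * x   -- l["t"], key present
  let m := l.getD "m" 0          -- l["m"], key present
  let fin := (List.range 4).foldl
    (fun (st : Int × Int × Option Int) _ =>
      let st' := f16_while x y z m 3 st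
      (st'.1, 0, st'.2.2))
    (0, s0, none)
  fin.2.2.getD 0   -- r is always bound (while runs at i = 0); none is unreachable

-- ===== PORT B =====
def f16_alt (x : Int) (y : Int) (z : Int) : Int :=
  let m := z * y
  let p := x * y
  if x < y then f1A m p (x*x + 6*y)
  else if x > z then f2A m p (x*x)
  else f3A m p (x*x)

-- ===== PRECONDITION & SPEC =====
def Spec_f16 (x : Int) (y : Int) (z : Int) (out : Int) : Prop := out = f16_alt x y z
instance (x : Int) (y : Int) (z : Int) (out : Int) : Decidable (Spec_f16 x y z out) := by unfold Spec_f16; infer_instance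

-- ===== CLAIM (what is proved, stated in full; the proofs are below) =====
def Claim_equal_f16 : Prop := ∀ (x : Int) (y : Int) (z : Int), Dom_f16 x y z → Spec_f16 x y z (f16 x y z)

-- ===== LEMMAS AND PROOFS =====

-- ===== VERDICT (by name: the statement is the Claim_ definition above) =====
theorem f16_spec : Claim_equal_f16 := by
  intro x y z _
  unfold Spec_f16 f16 f16_alt
  simp only [List.range_succ, List.range_zero, List.foldl_append, List.foldl_cons,
    List.foldl_nil, List.nil_append]
  by_cases hxy : x < y
  · simp [f16_while, hxy, PySem.Dict.ofList, PySem.Dict.getD,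
      PySem.Dict.get?, PySem.Dict.update, PySem.Dict.insert, PySem.Dict.empty, PySem.Dict.contains, f1A]
    ring_nf
    tauto
  · by_cases hxz : x > z
    · simp [f16_while, hxy, hxz, PySem.Dict.ofList, PySem.Dict.getD,
        PySem.Dict.get?, PySem.Dict.update, PySem.Dict.insert, PySem.Dict.empty, PySem.Dict.contains]
    · simp [f16_while, hxy, hxz, PySem.Dict.ofList, PySem.Dict.getD,
        PySem.Dict.get?, PySem.Dict.update, PySem.Dict.insert, PySem.Dict.empty, PySem.Dict.contains]
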